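-- pv_equiv track=rewrite | github.com/foax/adventofcode | 2021/10/day10.py | incomplete_chunk_score
-- ===== SOURCE A (Python) =====
-- def incomplete_chunk_score(stack):
--     points = {
--         '(': 1,
--         '[': 2,
--         '{': 3,
--         '<': 4
--     }
--
--     score = 0
--     for x in stack:
--         score = score * 5 + points[x]
--     return score
-- ===== SOURCE B (Python) =====
-- def incomplete_chunk_score(stack):
--     points = {
--         '(': 1,
--         '[': 2,
--         '{': 3,
--         '<': 4
--     }
--     total = 0
--     for i, c in enumerate(reversed(stack)):
--         total += points[c] * 5 ** i
--     return total
-- ===== Notes on version B (the rewrite author's own statement) =====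
-- stated objective: alternative
-- what changed: Replaces the running Horner multiply-accumulate over the stack with an explicit positional sum: iterate the reversed stack with enumerate and add points[c] * 5**i per position.
import Mathlib
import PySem

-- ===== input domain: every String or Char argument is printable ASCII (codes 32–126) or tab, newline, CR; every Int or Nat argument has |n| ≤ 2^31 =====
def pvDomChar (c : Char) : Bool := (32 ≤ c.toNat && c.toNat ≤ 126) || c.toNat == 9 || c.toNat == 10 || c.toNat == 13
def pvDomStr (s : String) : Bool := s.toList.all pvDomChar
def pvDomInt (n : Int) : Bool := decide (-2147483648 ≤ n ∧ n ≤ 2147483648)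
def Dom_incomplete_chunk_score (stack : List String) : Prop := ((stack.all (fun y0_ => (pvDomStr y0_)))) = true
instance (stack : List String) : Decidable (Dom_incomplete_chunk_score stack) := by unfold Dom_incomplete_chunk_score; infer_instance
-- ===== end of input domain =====

-- B replaces A's Horner multiply-accumulate with an explicit positional sum over the reversed stack (points[c] * 5**i); alternative decomposition, same results.

-- ===== PORT A =====
-- Python's points dict; points[x] raises KeyError on other keys — those inputs are excluded by Pre_, so getD 0 is exact on Pre_.
def pvPoints : PySem.Dict String Int :=
  PySem.Dict.ofList [("(", 1), ("[", 2), ("{", 3), ("<", 4)]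

def incomplete_chunk_score (stack : List String) : Int :=
  stack.foldl (fun score x => score * 5 + pvPoints.getD x 0) 0

-- ===== PORT B =====
-- total += points[c] * 5 ** i over enumerate(reversed(stack)); i ≥ 0 so ^ on Nat exponent is exact.
def incomplete_chunk_score_alt (stack : List String) : Int :=
  (PySem.List.enumerate stack.reverse 0).foldl
    (fun total p => total + pvPoints.getD p.2 0 * 5 ^ p.1.toNat) 0

-- ===== PRECONDITION & SPEC =====
-- Pre_ excludes inputs containing a character other than ( [ { <, on which the Python A (and B) raise KeyError.
def Pre_incomplete_chunk_score (stack : List String) : Prop :=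
  ∀ s ∈ stack, s = "(" ∨ s = "[" ∨ s = "{" ∨ s = "<"
instance (stack : List String) : Decidable (Pre_incomplete_chunk_score stack) := by
  unfold Pre_incomplete_chunk_score; infer_instance

def pvWitness_incomplete_chunk_score : List String := ["(", "[", "{", "<", "("]

def Spec_incomplete_chunk_score (stack : List String) (out : Int) : Prop := out = incomplete_chunk_score_alt stack
instance (stack : List String) (out : Int) : Decidable (Spec_incomplete_chunk_score stack out) := by unfold Spec_incomplete_chunk_score; infer_instance

-- ===== CLAIM (what is proved, stated in full; the proofs are below) =====
def Claim_equal_incomplete_chunk_score : Prop := ∀ (stack : List String), Dom_incomplete_chunk_score stack → Pre_incomplete_chunk_score stack → Spec_incomplete_chunk_score stack (incomplete_chunk_score stack)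

-- ===== LEMMAS AND PROOFS =====

-- Horner fold from an arbitrary accumulator: seed contributes s * 5^|l|.
theorem hornerA (l : List String) (s : Int) :
    l.foldl (fun score x => score * 5 + pvPoints.getD x 0) s
      = s * 5 ^ l.length + l.foldl (fun score x => score * 5 + pvPoints.getD x 0) 0 := by
  induction l generalizing s with
  | nil => simp
  | cons x xs ih =>
    simp only [List.foldl_cons, List.length_cons]
    rw [ih (s * 5 + pvPoints.getD x 0), ih (0 * 5 + pvPoints.getD x 0)]
    ring

theorem altB_cons (x : String) (xs : List String) :
    incomplete_chunk_score_alt (x :: xs)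
      = incomplete_chunk_score_alt xs + pvPoints.getD x 0 * 5 ^ xs.length := by
  unfold incomplete_chunk_score_alt
  rw [List.reverse_cons, PySem.List.enumerate_append, List.foldl_append]
  simp

theorem incomplete_chunk_score_eq (stack : List String) :
    incomplete_chunk_score stack = incomplete_chunk_score_alt stack := by
  induction stack with
  | nil => rfl
  | cons x xs ih =>
    rw [altB_cons]
    show List.foldl _ (0 * 5 + pvPoints.getD x 0) xs = _
    rw [hornerA]
    have h : List.foldl (fun score x => score * 5 + pvPoints.getD x 0) 0 xs
        = incomplete_chunk_score_alt xs := ih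
    rw [h]
    ring

-- ===== VERDICT (by name: the statement is the Claim_ definition above) =====
theorem incomplete_chunk_score_spec : Claim_equal_incomplete_chunk_score := by
  intro stack _ _
  exact incomplete_chunk_score_eq stack
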